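-- pv_equiv track=rewrite | github.com/turtlesoup0/itpe_topic_splitter | scripts/llm_verifier.py | _remove_containing_boundaries
-- ===== SOURCE A (Python) =====
-- def _remove_containing_boundaries(bdy: list[dict]) -> list[dict]:
--     """다른 토픽을 완전히 포함하는 부모 토픽 제거 (LLM 세션-전체 hallucination 방어).
--
--     예: {p29-42} 안에 {p30-32}, {p33-36}이 있으면 p29-42를 제거.
--     """
--     result = []
--     for i, b in enumerate(bdy):
--         ps_i = int(b.get("page_start", 0))
--         pe_i = int(b.get("page_end", ps_i))
--         sn_i = int(b.get("session", 1))
--         if ps_i >= pe_i: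
--             result.append(b)
--             continue
--         contains_others = 0
--         for j, c in enumerate(bdy):
--             if i == j:
--                 continue
--             if int(c.get("session", 1)) != sn_i:
--                 continue
--             ps_j = int(c.get("page_start", 0))
--             pe_j = int(c.get("page_end", ps_j))
--             # c가 b 내부에 완전히 포함되고 b가 c보다 엄격히 넓으면 contain 카운트
--             if ps_i <= ps_j and pe_j <= pe_i and (pe_i - ps_i) > (pe_j - ps_j):
--                 contains_others += 1
--         if contains_others >= 2:
--             # 2개 이상의 자식 토픽을 포함 → 세션-전체 hallucination으로 간주해 제거
--             continue
--         result.append(b)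
--     return result
-- ===== SOURCE B (Python) =====
-- def _remove_containing_boundaries(bdy: list[dict]) -> list[dict]:
--     """Counter-based re-implementation: aggregate (session, start, end) triples once,
--     then count contained children per distinct triple class instead of a per-pair scan."""
--     triples = []
--     for b in bdy:
--         ps = int(b.get("page_start", 0))
--         pe = int(b.get("page_end", ps))
--         sn = int(b.get("session", 1))
--         triples.append((sn, ps, pe))
--     cnt = {}
--     for t in triples:
--         cnt[t] = cnt.get(t, 0) + 1
--     out = []
--     for b, (sn, ps, pe) in zip(bdy, triples):
--         if ps >= pe:
--             out.append(b)
--             continue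
--         contained = sum(m for (s, p, q), m in cnt.items()
--                         if s == sn and ps <= p and q <= pe)
--         # 'contained' counts every same-session triple inside [ps, pe], including
--         # this element's own class; strictly-narrower children = contained - own class size
--         if contained - cnt[(sn, ps, pe)] >= 2:
--             continue
--         out.append(b)
--     return out
-- ===== Notes on version B (the rewrite author's own statement) =====
-- stated objective: alternative
-- what changed: Replaces A's per-element nested rescan of all boundaries by a one-pass aggregation of (session,start,end) triples into a counter, counting containments once per distinct triple class and obtaining strictness by subtracting the element's own class multiplicity instead of the j!=i strict-width test.
import Mathlib
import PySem

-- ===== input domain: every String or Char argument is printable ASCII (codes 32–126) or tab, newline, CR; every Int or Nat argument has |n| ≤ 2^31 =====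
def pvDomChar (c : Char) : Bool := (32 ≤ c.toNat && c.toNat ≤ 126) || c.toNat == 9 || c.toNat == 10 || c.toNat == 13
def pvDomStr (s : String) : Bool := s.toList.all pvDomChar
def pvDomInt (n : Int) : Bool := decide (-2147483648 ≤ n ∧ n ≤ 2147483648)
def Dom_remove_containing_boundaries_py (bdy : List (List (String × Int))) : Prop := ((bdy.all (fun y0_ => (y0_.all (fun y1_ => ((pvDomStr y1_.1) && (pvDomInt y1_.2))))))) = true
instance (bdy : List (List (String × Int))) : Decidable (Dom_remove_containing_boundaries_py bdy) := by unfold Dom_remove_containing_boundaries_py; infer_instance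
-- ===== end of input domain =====

-- B replaces A's per-pair nested scan by a one-pass (session,start,end)-triple counter and a
-- per-distinct-class containment count (strictness = subtracting the element's own class size).

-- b.get(key, default) on a Python dict (assoc list, first match)
def pvGetKey (b : List (String × Int)) (k : String) (d : Int) : Int :=
  (PySem.Dict.mk b).getD k d

-- ===== PORT A =====
def remove_containing_boundaries_py (bdy : List (List (String × Int))) : List (List (String × Int)) :=
  (PySem.List.enumerate bdy).foldl (fun result ib =>
    let i := ib.1
    let b := ib.2
    let ps_i := pvGetKey b "page_start" 0
    let pe_i := pvGetKey b "page_end" ps_i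
    let sn_i := pvGetKey b "session" 1
    if ps_i ≥ pe_i then result ++ [b]
    else
      let contains_others : Int := (PySem.List.enumerate bdy).foldl (fun acc jc =>
        let j := jc.1
        let c := jc.2
        if i = j then acc
        else if pvGetKey c "session" 1 ≠ sn_i then acc
        else
          let ps_j := pvGetKey c "page_start" 0
          let pe_j := pvGetKey c "page_end" ps_j
          if ps_i ≤ ps_j ∧ pe_j ≤ pe_i ∧ pe_i - ps_i > pe_j - ps_j then acc + 1 else acc) 0
      if contains_others ≥ 2 then result else result ++ [b]) []

-- ===== PORT B =====
def remove_containing_boundaries_py_alt (bdy : List (List (String × Int))) : List (List (String × Int)) :=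
  let triples : List (Int × Int × Int) := bdy.foldl (fun ts b =>
    let ps := pvGetKey b "page_start" 0
    let pe := pvGetKey b "page_end" ps
    let sn := pvGetKey b "session" 1
    ts ++ [(sn, ps, pe)]) []
  let cnt : PySem.Dict (Int × Int × Int) Int :=
    triples.foldl (fun d t => d.insert t (d.getD t 0 + 1)) PySem.Dict.empty
  (bdy.zip triples).foldl (fun out bt =>
    let b := bt.1
    let sn := bt.2.1
    let ps := bt.2.2.1
    let pe := bt.2.2.2
    if ps ≥ pe then out ++ [b]
    else
      let contained : Int := cnt.items.foldl (fun acc km =>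
        if km.1.1 = sn ∧ ps ≤ km.1.2.1 ∧ km.1.2.2 ≤ pe then acc + km.2 else acc) 0
      if contained - cnt.getD (sn, ps, pe) 0 ≥ 2 then out else out ++ [b]) []

-- ===== PRECONDITION & SPEC =====
def Spec_remove_containing_boundaries_py (bdy : List (List (String × Int))) (out : List (List (String × Int))) : Prop := out = remove_containing_boundaries_py_alt bdy
instance (bdy : List (List (String × Int))) (out : List (List (String × Int))) : Decidable (Spec_remove_containing_boundaries_py bdy out) := by unfold Spec_remove_containing_boundaries_py; infer_instance

-- ===== CLAIM (what is proved, stated in full; the proofs are below) =====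
def Claim_equal_remove_containing_boundaries_py : Prop := ∀ (bdy : List (List (String × Int))), Dom_remove_containing_boundaries_py bdy → Spec_remove_containing_boundaries_py bdy (remove_containing_boundaries_py bdy)

-- ===== LEMMAS AND PROOFS =====

-- the (session, page_start, page_end) triple both programs read off a boundary dict
def pvTri (b : List (String × Int)) : Int × Int × Int :=
  (pvGetKey b "session" 1, pvGetKey b "page_start" 0,
   pvGetKey b "page_end" (pvGetKey b "page_start" 0))

-- "k lies in t's session and page range"
def pvContB (t k : Int × Int × Int) : Bool :=
  decide (k.1 = t.1 ∧ t.2.1 ≤ k.2.1 ∧ k.2.2 ≤ t.2.2)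

-- "k lies in t's session and page range and is strictly narrower"
def pvStrictB (t k : Int × Int × Int) : Bool :=
  decide (k.1 = t.1 ∧ t.2.1 ≤ k.2.1 ∧ k.2.2 ≤ t.2.2 ∧ t.2.2 - t.2.1 > k.2.2 - k.2.1)

-- common reference form: keep b unless its strict-containment count in bdy is ≥ 2
def pvStep (bdy : List (List (String × Int))) (res : List (List (String × Int)))
    (b : List (String × Int)) : List (List (String × Int)) :=
  if (pvTri b).2.1 ≥ (pvTri b).2.2 then res ++ [b]
  else if (((bdy.map pvTri).countP (pvStrictB (pvTri b)) : Int)) ≥ 2 then res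
  else res ++ [b]

def pvRef (bdy : List (List (String × Int))) : List (List (String × Int)) :=
  bdy.foldl (pvStep bdy) []

theorem pvPoint (t x : Int × Int × Int) :
    (if pvContB t x then (1 : Nat) else 0)
      = (if pvStrictB t x then 1 else 0) + (if x = t then 1 else 0) := by
  obtain ⟨ts, tp, tq⟩ := t
  obtain ⟨s, p, q⟩ := x
  simp only [pvContB, pvStrictB, decide_eq_true_eq, Prod.mk.injEq]
  split_ifs <;> omega

theorem pvCount_split (t : Int × Int × Int) (l : List (Int × Int × Int)) :
    l.countP (pvContB t) = l.countP (pvStrictB t) + l.count t := by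
  induction l with
  | nil => simp
  | cons x xs ih =>
    simp only [List.countP_cons, List.count_cons, ih, beq_iff_eq]
    have := pvPoint t x
    omega

-- strict containment is irreflexive
theorem pvStrict_self (t : Int × Int × Int) : pvStrictB t t = false := by
  obtain ⟨s, p, q⟩ := t
  simp [pvStrictB]

-- fold-with-if-add over a key list = Int sum over the filtered keys
theorem pvFoldIf (P : Int × Int × Int → Prop) [DecidablePred P]
    (f : Int × Int × Int → Int) :
    ∀ (l : List (Int × Int × Int)) (acc : Int),
      l.foldl (fun acc k => if P k then acc + f k else acc) acc
        = acc + (((l.filter (fun k => decide (P k))).map f).sum) := by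
  intro l
  induction l with
  | nil => simp
  | cons x xs ih =>
    intro acc
    by_cases h : P x <;> simp [h, ih] <;> ring

-- sum of per-class counts over the distinct triples = total countP
theorem pvSumCount (l : List (Int × Int × Int)) (t : Int × Int × Int) :
    (((PySem.Set.ofList l).filter (pvContB t)).map (fun k => (l.count k : Int))).sum
      = (l.countP (pvContB t) : Int) := by
  have hperm : (PySem.Set.ofList l).Perm l.dedup := by
    apply (List.perm_ext_iff_of_nodup ?_ (List.nodup_dedup l)).2
    · intro a
      rw [← PySem.List.dedup_eq_ofList]
      rw [PySem.List.mem_dedup, List.mem_dedup]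
    · rw [← PySem.List.dedup_eq_ofList]
      exact PySem.List.nodup_dedup l
  have h2 := ((hperm.filter (pvContB t)).map (fun k => (l.count k : Int))).sum_eq
  rw [h2]
  have h3 := List.sum_map_count_dedup_filter_eq_countP (pvContB t) l
  calc ((l.dedup.filter (pvContB t)).map (fun k => (l.count k : Int))).sum
      = (((l.dedup.filter (pvContB t)).map l.count).map (fun n : Nat => (n : Int))).sum := by
        rw [List.map_map]; rfl
    _ = (((l.dedup.filter (pvContB t)).map l.count).sum : Int) := by
        rw [Nat.cast_list_sum]
    _ = (l.countP (pvContB t) : Int) := by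
        have hinst : (instBEqOfDecidableEq : BEq (Int × Int × Int)) = instBEqProd :=
          lawful_beq_subsingleton _ _
        rw [hinst] at h3
        exact_mod_cast h3

-- B's triples loop builds bdy.map pvTri
theorem pvTriples (bdy : List (List (String × Int))) :
    bdy.foldl (fun ts b =>
      ts ++ [(pvGetKey b "session" 1, pvGetKey b "page_start" 0,
              pvGetKey b "page_end" (pvGetKey b "page_start" 0))]) []
      = bdy.map pvTri := by
  have h := PySem.List.foldl_append_singleton_eq_map pvTri bdy []
  simpa [pvTri] using h

-- B equals the reference form
theorem pvB_ref (bdy : List (List (String × Int))) :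
    remove_containing_boundaries_py_alt bdy = pvRef bdy := by
  simp only [remove_containing_boundaries_py_alt]
  rw [pvTriples, PySem.Dict.foldl_insert_getD_add_one_eq_counter]
  have hzip : ∀ l : List (List (String × Int)),
      l.zip (l.map pvTri) = l.map (fun b => (b, pvTri b)) := by
    intro l
    induction l with
    | nil => rfl
    | cons x xs ih => simp [ih]
  rw [hzip bdy, List.foldl_map]
  unfold pvRef
  apply PySem.List.foldl_congr_mem
  intro out b _
  simp only [pvStep]
  by_cases hdeg : (pvTri b).2.1 ≥ (pvTri b).2.2
  · rw [if_pos hdeg, if_pos hdeg]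
  · rw [if_neg hdeg, if_neg hdeg]
    have hcontained :
        (PySem.Dict.counter (bdy.map pvTri)).items.foldl (fun acc km =>
          if km.1.1 = (pvTri b).1 ∧ (pvTri b).2.1 ≤ km.1.2.1 ∧ km.1.2.2 ≤ (pvTri b).2.2
          then acc + km.2 else acc) 0
          = ((bdy.map pvTri).countP (pvContB (pvTri b)) : Int) := by
      rw [PySem.Dict.items_counter, List.foldl_map]
      have hfold := pvFoldIf
        (fun k => k.1 = (pvTri b).1 ∧ (pvTri b).2.1 ≤ k.2.1 ∧ k.2.2 ≤ (pvTri b).2.2)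
        (fun k => ((bdy.map pvTri).count k : Int))
        (PySem.Set.ofList (bdy.map pvTri)) 0
      rw [hfold]
      have hfilter : ((PySem.Set.ofList (bdy.map pvTri)).filter
            (fun k => decide (k.1 = (pvTri b).1 ∧ (pvTri b).2.1 ≤ k.2.1 ∧ k.2.2 ≤ (pvTri b).2.2)))
          = ((PySem.Set.ofList (bdy.map pvTri)).filter (pvContB (pvTri b))) := by
        apply List.filter_congr
        intro k _
        simp [pvContB]
      rw [hfilter, pvSumCount]
      omega
    rw [hcontained]
    have hgetD : (PySem.Dict.counter (bdy.map pvTri)).getD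
          ((pvTri b).1, (pvTri b).2.1, (pvTri b).2.2) 0
        = ((bdy.map pvTri).count (pvTri b) : Int) := by
      rw [PySem.Dict.getD_counter]
    rw [hgetD]
    have hsplit := pvCount_split (pvTri b) (bdy.map pvTri)
    by_cases hge : (((bdy.map pvTri).countP (pvStrictB (pvTri b)) : Int)) ≥ 2
    · rw [if_pos (by omega), if_pos hge]
    · rw [if_neg (by omega), if_neg hge]

-- A's inner loop counts strict containments
theorem pvInnerA (sn ps pe : Int) (i : Int) :
    ∀ (E : List (Int × List (String × Int))) (acc : Int),
    (∀ c, (i, c) ∈ E → pvStrictB (sn, ps, pe) (pvTri c) = false) →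
    E.foldl (fun acc jc =>
      if i = jc.1 then acc
      else if pvGetKey jc.2 "session" 1 ≠ sn then acc
      else if ps ≤ pvGetKey jc.2 "page_start" 0 ∧
              pvGetKey jc.2 "page_end" (pvGetKey jc.2 "page_start" 0) ≤ pe ∧
              pe - ps > pvGetKey jc.2 "page_end" (pvGetKey jc.2 "page_start" 0)
                          - pvGetKey jc.2 "page_start" 0 then acc + 1 else acc) acc
      = acc + (((E.map (·.2)).map pvTri).countP (pvStrictB (sn, ps, pe)) : Int) := by
  intro E
  induction E with
  | nil => intro acc _; simp
  | cons jc E ih =>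
    intro acc h
    obtain ⟨j, c⟩ := jc
    have hE : ∀ c', (i, c') ∈ E → pvStrictB (sn, ps, pe) (pvTri c') = false :=
      fun c' hm => h c' (List.mem_cons_of_mem _ hm)
    simp only [List.foldl_cons, List.map_cons, List.countP_cons]
    by_cases h1 : i = j
    · have hc : pvStrictB (sn, ps, pe) (pvTri c) = false := by
        apply h c; rw [h1]; exact List.mem_cons_self
      rw [if_pos h1, ih _ hE, hc]
      simp
    · rw [if_neg h1]
      by_cases h2 : pvGetKey c "session" 1 ≠ sn
      · have hc : pvStrictB (sn, ps, pe) (pvTri c) = false := by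
          simp only [pvStrictB, pvTri, decide_eq_false_iff_not]
          intro hcon
          exact h2 hcon.1
        rw [if_pos h2, ih _ hE, hc]
        simp
      · rw [if_neg h2]
        push_neg at h2
        by_cases h3 : ps ≤ pvGetKey c "page_start" 0 ∧
            pvGetKey c "page_end" (pvGetKey c "page_start" 0) ≤ pe ∧
            pe - ps > pvGetKey c "page_end" (pvGetKey c "page_start" 0)
                        - pvGetKey c "page_start" 0
        · have hc : pvStrictB (sn, ps, pe) (pvTri c) = true := by
            simp only [pvStrictB, pvTri, decide_eq_true_eq]
            exact ⟨h2, h3.1, h3.2.1, h3.2.2⟩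
          rw [if_pos h3, ih _ hE, hc]
          simp
          omega
        · have hc : pvStrictB (sn, ps, pe) (pvTri c) = false := by
            simp only [pvStrictB, pvTri, decide_eq_false_iff_not]
            intro hcon
            exact h3 ⟨hcon.2.1, hcon.2.2.1, hcon.2.2.2⟩
          rw [if_neg h3, ih _ hE, hc]
          simp

-- A equals the reference form
theorem pvA_ref (bdy : List (List (String × Int))) :
    remove_containing_boundaries_py bdy = pvRef bdy := by
  simp only [remove_containing_boundaries_py]
  have hrhs : pvRef bdy = (PySem.List.enumerate bdy 0).foldl
      (fun res ib => pvStep bdy res ib.2) [] := by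
    unfold pvRef
    have h1 : ((PySem.List.enumerate bdy 0).map (fun x => x.2)).foldl (pvStep bdy) [] =
        (PySem.List.enumerate bdy 0).foldl (fun res ib => pvStep bdy res ib.2) [] :=
      List.foldl_map
    rw [PySem.List.map_snd_enumerate] at h1
    exact h1
  rw [hrhs]
  apply PySem.List.foldl_congr_mem
  intro acc ib hmem
  obtain ⟨i, b⟩ := ib
  have hskip : ∀ c, (i, c) ∈ PySem.List.enumerate bdy 0 →
      pvStrictB (pvGetKey b "session" 1, pvGetKey b "page_start" 0,
        pvGetKey b "page_end" (pvGetKey b "page_start" 0)) (pvTri c) = false := by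
    intro c hc
    rw [PySem.List.mem_enumerate_iff] at hmem hc
    obtain ⟨k, hk, hkeq⟩ := hmem
    obtain ⟨k', hk', hkeq'⟩ := hc
    rw [Prod.mk.injEq] at hkeq hkeq'
    have hkk : (k : Int) = (k' : Int) := by
      have := hkeq.1
      have := hkeq'.1
      omega
    have hcb : c = b := by
      rw [hkeq.2, hkeq'.2]
      congr 1
      exact_mod_cast hkk.symm
    rw [hcb]
    exact pvStrict_self (pvTri b)
  simp only [pvStep]
  by_cases hdeg : pvGetKey b "page_start" 0 ≥ pvGetKey b "page_end" (pvGetKey b "page_start" 0)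
  · rw [if_pos hdeg, if_pos (show (pvTri b).2.1 ≥ (pvTri b).2.2 from hdeg)]
  · rw [if_neg hdeg, if_neg (show ¬ (pvTri b).2.1 ≥ (pvTri b).2.2 from hdeg)]
    rw [pvInnerA (pvGetKey b "session" 1) (pvGetKey b "page_start" 0)
      (pvGetKey b "page_end" (pvGetKey b "page_start" 0)) i
      (PySem.List.enumerate bdy 0) 0 hskip]
    rw [PySem.List.map_snd_enumerate]
    rw [zero_add]
    rfl

-- ===== VERDICT (by name: the statement is the Claim_ definition above) =====
theorem remove_containing_boundaries_py_spec : Claim_equal_remove_containing_boundaries_py := by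
  intro bdy _
  unfold Spec_remove_containing_boundaries_py
  rw [pvA_ref, pvB_ref]
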